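-- pv_equiv track=rewrite | github.com/cfhaiteeh/PG-GSQL | new_i_data_process.py | cal_select_num
-- ===== SOURCE A (Python) =====
-- CLAUSE_KEYWORDS = ('select','having', 'from', 'where', 'group', 'order', 'limit', 'intersect', 'union', 'except','desc','asc')
--
-- def cal_select_num(sql_toks,column_names):
--
--     nc=[ tk[1].lower() for tk in column_names]
--     num=0
--     flag=0
--     sel1_cols=[]
--     for tk in sql_toks:
--         tk=tk.lower()
--
--         if flag==1 and tk in CLAUSE_KEYWORDS:
--             break
--         if tk =='select' and flag==0:
--             flag=1
--         if flag==1 and (tk in nc or tk =='*'):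
--             num+=1
--             sel1_cols.append(tk)
--     return num,sel1_cols
-- ===== SOURCE B (Python) =====
-- CLAUSE_KEYWORDS = ('select','having', 'from', 'where', 'group', 'order', 'limit', 'intersect', 'union', 'except','desc','asc')
--
-- def _after_select(lows):
--     """Suffix strictly after the first 'select', or None if there is none."""
--     for i, t in enumerate(lows):
--         if t == 'select':
--             return lows[i + 1:]
--     return None
--
-- def _prefix_upto_keyword(toks):
--     """Longest prefix containing no clause keyword."""
--     out = []
--     for t in toks:
--         if t in CLAUSE_KEYWORDS:
--             break
--         out.append(t)
--     return out
--
-- def cal_select_num(sql_toks, column_names):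
--     lows = [t.lower() for t in sql_toks]
--     after = _after_select(lows)
--     if after is None:
--         return 0, []
--     seg = _prefix_upto_keyword(after)
--     ncset = {n.lower() for _, n in column_names}
--     picked = [t for t in seg if t in ncset or t == '*']
--     return len(picked), picked
-- ===== Notes on version B (the rewrite author's own statement) =====
-- stated objective: alternative
-- what changed: Replaces A's single flag-and-counter scan with explicit structure: locate the suffix after the first 'select', take its keyword-free prefix, then filter that segment against a set of lowercased column names and return its length and contents.
-- intended difference: When a column is literally named 'select' and the tokens contain 'select', A counts the SELECT keyword itself as a selected column (one extra count and a leading 'select' in the list); B counts only tokens after the keyword, which is the intended reading of 'count selected columns'. — e.g. on cal_select_num(["select", "a"], [(0, "select"), (1, "a")]): A returns (2, ["select", "a"]), B returns (1, ["a"])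
import Mathlib
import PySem

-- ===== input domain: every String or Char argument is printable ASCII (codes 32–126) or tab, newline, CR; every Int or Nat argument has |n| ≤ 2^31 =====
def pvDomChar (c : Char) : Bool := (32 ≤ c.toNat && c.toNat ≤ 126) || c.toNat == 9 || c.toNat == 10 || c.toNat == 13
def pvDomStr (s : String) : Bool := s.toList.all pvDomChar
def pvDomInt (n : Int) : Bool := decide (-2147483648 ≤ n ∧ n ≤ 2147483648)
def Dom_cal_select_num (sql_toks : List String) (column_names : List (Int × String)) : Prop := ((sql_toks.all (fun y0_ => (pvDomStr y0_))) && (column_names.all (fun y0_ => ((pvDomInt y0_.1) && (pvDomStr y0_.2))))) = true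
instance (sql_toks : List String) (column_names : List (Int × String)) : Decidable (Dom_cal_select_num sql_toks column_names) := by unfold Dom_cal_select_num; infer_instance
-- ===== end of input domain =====

-- B restructures A's flag-driven scan into boundary-finding (suffix after the first
-- 'select', keyword-free prefix) followed by a separate filtering pass; same cost.

def CLAUSE_KEYWORDS : List String :=
  ["select", "having", "from", "where", "group", "order", "limit",
   "intersect", "union", "except", "desc", "asc"]

-- ===== PORT A =====
-- the for-loop of A with its state (num, flag, sel1_cols); `break` returns the state
def calLoopA (nc : List String) : List String → Int → Int → List String → Int × List String
  | [], num, _flag, cols => (num, cols)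
  | tk :: rest, num, flag, cols =>
    let tk := PySem.Str.lower tk
    if flag == 1 && CLAUSE_KEYWORDS.contains tk then (num, cols)
    else
      let flag := if tk == "select" && flag == 0 then 1 else flag
      if flag == 1 && (nc.contains tk || tk == "*") then
        calLoopA nc rest (num + 1) flag (cols ++ [tk])
      else
        calLoopA nc rest num flag cols

def cal_select_num (sql_toks : List String) (column_names : List (Int × String)) : Int × List String :=
  let nc := column_names.map (fun tk => PySem.Str.lower tk.2)
  calLoopA nc sql_toks 0 0 []

-- ===== PORT B =====
def afterSelect : List String → Option (List String)
  | [] => none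
  | t :: rest => if t == "select" then some rest else afterSelect rest

def prefixUptoKeyword : List String → List String
  | [] => []
  | t :: rest => if CLAUSE_KEYWORDS.contains t then [] else t :: prefixUptoKeyword rest

def cal_select_num_alt (sql_toks : List String) (column_names : List (Int × String)) : Int × List String :=
  let lows := sql_toks.map PySem.Str.lower
  match afterSelect lows with
  | none => (0, [])
  | some after =>
    let seg := prefixUptoKeyword after
    let ncset := PySem.Set.ofList (column_names.map (fun p => PySem.Str.lower p.2))
    let picked := seg.filter (fun t => PySem.Set.contains ncset t || t == "*")
    ((picked.length : Int), picked)

-- ===== PRECONDITION & SPEC =====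
-- When a column is literally named 'select' and the tokens contain 'select', A counts the
-- SELECT keyword itself as a selected column (one extra count and a leading 'select' in the
-- list); B counts only tokens after the keyword, the intended reading of the function.
def D_cal_select_num (sql_toks : List String) (column_names : List (Int × String)) : Prop :=
  ("select" ∈ sql_toks.map PySem.Str.lower) ∧
  ("select" ∈ column_names.map (fun p => PySem.Str.lower p.2))
instance (sql_toks : List String) (column_names : List (Int × String)) : Decidable (D_cal_select_num sql_toks column_names) := by unfold D_cal_select_num; infer_instance

def Spec_cal_select_num (sql_toks : List String) (column_names : List (Int × String)) (out : Int × List String) : Prop := ¬ D_cal_select_num sql_toks column_names → out = cal_select_num_alt sql_toks column_names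
instance (sql_toks : List String) (column_names : List (Int × String)) (out : Int × List String) : Decidable (Spec_cal_select_num sql_toks column_names out) := by unfold Spec_cal_select_num; infer_instance

def pvDiffWitness_cal_select_num : List String × (List (Int × String)) :=
  (["select", "a"], [(0, "select"), (1, "a")])
def pvDiffWitnessOut_cal_select_num : (Int × List String) × (Int × List String) :=
  ((2, ["select", "a"]), (1, ["a"]))

-- ===== CLAIM (what is proved, stated in full; the proofs are below) =====
def Claim_unchanged_cal_select_num : Prop := ∀ (sql_toks : List String) (column_names : List (Int × String)), Dom_cal_select_num sql_toks column_names → Spec_cal_select_num sql_toks column_names (cal_select_num sql_toks column_names)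
def Claim_changed_cal_select_num : Prop := Dom_cal_select_num (pvDiffWitness_cal_select_num.1) (pvDiffWitness_cal_select_num.2) ∧ D_cal_select_num (pvDiffWitness_cal_select_num.1) (pvDiffWitness_cal_select_num.2) ∧ cal_select_num (pvDiffWitness_cal_select_num.1) (pvDiffWitness_cal_select_num.2) = pvDiffWitnessOut_cal_select_num.1 ∧ cal_select_num_alt (pvDiffWitness_cal_select_num.1) (pvDiffWitness_cal_select_num.2) = pvDiffWitnessOut_cal_select_num.2 ∧ pvDiffWitnessOut_cal_select_num.1 ≠ pvDiffWitnessOut_cal_select_num.2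
def Claim_exact_cal_select_num : Prop := ∀ (sql_toks : List String) (column_names : List (Int × String)), Dom_cal_select_num sql_toks column_names → D_cal_select_num sql_toks column_names → cal_select_num sql_toks column_names ≠ cal_select_num_alt sql_toks column_names

-- ===== LEMMAS AND PROOFS =====

-- Set membership agrees with list membership of A's `nc`
theorem set_contains_eq (nc : List String) (t : String) :
    PySem.Set.contains (PySem.Set.ofList nc) t = nc.contains t := by
  simp only [PySem.Set.contains_eq_listContains]
  by_cases h : t ∈ nc <;> simp [h, PySem.Set.mem_ofList]

-- Phase 1 (flag = 1): A's loop appends exactly the filtered keyword-free prefix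
theorem phase1 (nc : List String) (xs : List String) :
    ∀ (num : Int) (cols : List String),
    calLoopA nc xs num 1 cols =
      (num + ((prefixUptoKeyword (xs.map PySem.Str.lower)).filter
                (fun t => nc.contains t || t == "*")).length,
       cols ++ (prefixUptoKeyword (xs.map PySem.Str.lower)).filter
                (fun t => nc.contains t || t == "*")) := by
  induction xs with
  | nil => intro num cols; simp [calLoopA, prefixUptoKeyword]
  | cons tk rest ih =>
    intro num cols
    by_cases hk : PySem.Str.lower tk ∈ CLAUSE_KEYWORDS
    · simp [calLoopA, prefixUptoKeyword, hk]
    · by_cases hc : PySem.Str.lower tk ∈ nc ∨ PySem.Str.lower tk = "*"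
      · simp [calLoopA, prefixUptoKeyword, hk, hc, ih, Prod.ext_iff]
        omega
      · simp [calLoopA, prefixUptoKeyword, hk, hc, ih]

-- Phase 0 (flag = 0): A's loop skips until the first 'select', then enters phase 1,
-- counting the 'select' token itself iff it is among the column names
theorem phase0 (nc : List String) (xs : List String) :
    calLoopA nc xs 0 0 [] =
      match afterSelect (xs.map PySem.Str.lower) with
      | none => (0, [])
      | some after =>
        let picked := (("select" : String) :: prefixUptoKeyword after).filter
                        (fun t => nc.contains t || t == "*")
        ((picked.length : Int), picked) := by
  induction xs with
  | nil => simp [calLoopA, afterSelect]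
  | cons tk rest ih =>
    by_cases hs : PySem.Str.lower tk = "select"
    · by_cases hc : ("select" : String) ∈ nc
      · simp [calLoopA, afterSelect, hs, hc, phase1, List.filter]
        omega
      · simp [calLoopA, afterSelect, hs, hc, phase1, List.filter]
    · simp [calLoopA, afterSelect, hs, ih]

-- if 'select' is not among the lowered tokens, afterSelect finds nothing
theorem afterSelect_none_iff (xs : List String) :
    afterSelect xs = none ↔ ("select" : String) ∉ xs := by
  induction xs with
  | nil => simp [afterSelect]
  | cons t rest ih =>
    by_cases h : t = "select"
    · simp [afterSelect, h]
    · rw [show afterSelect (t :: rest) = afterSelect rest by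
        simp [afterSelect, h], ih]
      simp only [List.mem_cons, not_or]
      constructor
      · intro hn; exact ⟨fun he => h he.symm, hn⟩
      · intro hn; exact hn.2

-- ===== VERDICT (by name: the statement is the Claim_ definition above) =====
theorem cal_select_num_spec : Claim_unchanged_cal_select_num := by
  intro sql_toks column_names _ hD
  unfold cal_select_num cal_select_num_alt
  rw [phase0]
  cases h : afterSelect (sql_toks.map PySem.Str.lower) with
  | none => simp [h]
  | some after =>
    simp only [h]
    have hsel : ("select" : String) ∈ sql_toks.map PySem.Str.lower := by
      by_contra hn
      rw [← afterSelect_none_iff] at hn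
      simp [hn] at h
    have hnc : ("select" : String) ∉ column_names.map (fun p => PySem.Str.lower p.2) := by
      intro hmem
      exact hD ⟨hsel, hmem⟩
    have hf : ∀ xs : List String,
        xs.filter (fun t => (column_names.map (fun tk => PySem.Str.lower tk.2)).contains t || t == "*") =
        xs.filter (fun t => PySem.Set.contains (PySem.Set.ofList (column_names.map (fun p => PySem.Str.lower p.2))) t || t == "*") := by
      intro xs
      apply List.filter_congr
      intro t _
      rw [set_contains_eq]
    simp only [List.filter, hf]
    simp [hnc]

theorem cal_select_num_changed : Claim_changed_cal_select_num := by
  unfold Claim_changed_cal_select_num; decide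

theorem cal_select_num_tight : Claim_exact_cal_select_num := by
  intro sql_toks column_names _ hD heq
  obtain ⟨hsel, hnc⟩ := hD
  unfold cal_select_num cal_select_num_alt at heq
  rw [phase0] at heq
  cases h : afterSelect (sql_toks.map PySem.Str.lower) with
  | none =>
    rw [afterSelect_none_iff] at h
    exact h hsel
  | some after =>
    simp only [h] at heq
    -- A's picked list has the extra leading "select"; lengths differ by one
    have hlen := congrArg (fun p : Int × List String => p.2.length) heq
    simp only [List.filter_cons] at hlen
    have hfilt : (prefixUptoKeyword after).filter
        (fun t => (column_names.map (fun tk => PySem.Str.lower tk.2)).contains t || t == "*") =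
        (prefixUptoKeyword after).filter
        (fun t => PySem.Set.contains (PySem.Set.ofList (column_names.map (fun tk => PySem.Str.lower tk.2))) t || t == "*") := by
      apply List.filter_congr
      intro t _
      rw [set_contains_eq]
    rw [hfilt] at hlen
    simp [hnc] at hlen
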